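-- pv_equiv track=rewrite | github.com/anmaletic/PMA-Code | Test/6_2_compare.py | makniGetNajvece3
-- ===== SOURCE A (Python) =====
-- def makniGetNajvece3(lista:list, n:int):
--     lista.sort(reverse=True)
--     while n > 0:
--         if(lista[0] == lista[1]):
--             lista.remove(lista[0])
--         else:
--             lista.remove(lista[0])
--             n -= 1
--
--     return lista
-- ===== SOURCE B (Python) =====
-- def makniGetNajvece3(lista: list, n: int):
--     # Return value only: A sorts/removes in place, B leaves the argument untouched.
--     if n <= 0:
--         return sorted(lista, reverse=True)
--     distinct = sorted(set(lista))
--     if n >= len(distinct):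
--         return []
--     thr = distinct[-n - 1]  # largest value that is kept
--     return sorted((x for x in lista if x <= thr), reverse=True)
-- ===== Notes on version B (the rewrite author's own statement) =====
-- stated objective: faster
-- what changed: Instead of a while loop that removes the head element one at a time (each list.remove is O(n)), B sorts once, finds the n-th largest distinct value as a threshold via sorted(set(...)), and keeps everything below it with a single filter.
import Mathlib
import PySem

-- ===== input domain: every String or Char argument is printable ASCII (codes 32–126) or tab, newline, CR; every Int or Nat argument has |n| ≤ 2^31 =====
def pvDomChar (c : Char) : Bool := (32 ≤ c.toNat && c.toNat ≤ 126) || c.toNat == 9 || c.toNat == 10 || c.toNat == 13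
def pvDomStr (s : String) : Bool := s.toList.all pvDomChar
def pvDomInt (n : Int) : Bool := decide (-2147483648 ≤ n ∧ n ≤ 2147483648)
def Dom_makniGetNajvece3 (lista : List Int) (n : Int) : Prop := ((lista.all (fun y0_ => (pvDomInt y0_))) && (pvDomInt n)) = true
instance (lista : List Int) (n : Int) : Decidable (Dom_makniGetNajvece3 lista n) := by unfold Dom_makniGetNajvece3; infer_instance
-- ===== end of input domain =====

-- B replaces A's remove-one-at-a-time while loop by one sort, a threshold from sorted(set(...)), and a single
-- filter (faster). Equivalence is about the RETURN value only: A sorts/removes the argument in place, B does not.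

-- ===== PORT A =====
-- A's while loop: on a list with head twice, lista.remove(lista[0]) deletes the first occurrence of the
-- head, i.e. yields the tail (exact for any list).  When the list has fewer than 2 elements and n > 0,
-- Python raises IndexError on lista[1] — those inputs are outside Pre_ (the [] result there is never claimed).
def pvALoop (l : List Int) (n : Int) : List Int :=
  if 0 < n then
    match l with
    | a :: b :: t => if a = b then pvALoop (b :: t) n else pvALoop (b :: t) (n - 1)
    | _ => []
  else l
termination_by l.length

def makniGetNajvece3 (lista : List Int) (n : Int) : List Int :=
  pvALoop (PySem.List.sorted lista (fun x => x) true) n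

-- ===== PORT B =====
def makniGetNajvece3_alt (lista : List Int) (n : Int) : List Int :=
  if n ≤ 0 then PySem.List.sorted lista (fun x => x) true
  else
    let distinct := PySem.List.sorted (PySem.Set.ofList lista) (fun x => x) false
    if (distinct.length : Int) ≤ n then []
    else
      match PySem.List.pyGet? distinct (-n - 1) with
      | some thr => PySem.List.sorted (lista.filter (fun x => decide (x ≤ thr))) (fun x => x) true
      | none => []  -- unreachable: the guard puts -n-1 in range

-- ===== PRECONDITION & SPEC =====
-- Pre_ excludes exactly the inputs on which A raises IndexError: n > 0 with at most n distinct values.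
def Pre_makniGetNajvece3 (lista : List Int) (n : Int) : Prop :=
  n ≤ 0 ∨ n < ((PySem.List.dedup lista).length : Int)
instance (lista : List Int) (n : Int) : Decidable (Pre_makniGetNajvece3 lista n) := by
  unfold Pre_makniGetNajvece3; infer_instance

def pvWitness_makniGetNajvece3 : List Int × Int := ([3, 1, 2, 1], 1)

def Spec_makniGetNajvece3 (lista : List Int) (n : Int) (out : List Int) : Prop := out = makniGetNajvece3_alt lista n
instance (lista : List Int) (n : Int) (out : List Int) : Decidable (Spec_makniGetNajvece3 lista n out) := by unfold Spec_makniGetNajvece3; infer_instance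

-- ===== CLAIM (what is proved, stated in full; the proofs are below) =====
def Claim_equal_makniGetNajvece3 : Prop := ∀ (lista : List Int) (n : Int), Dom_makniGetNajvece3 lista n → Pre_makniGetNajvece3 lista n → Spec_makniGetNajvece3 lista n (makniGetNajvece3 lista n)

-- ===== LEMMAS AND PROOFS =====

def pvDDist : List Int → List Int
  | [] => []
  | [a] => [a]
  | a :: b :: t => if a = b then pvDDist (b :: t) else a :: pvDDist (b :: t)

theorem mem_pvDDist (l : List Int) (x : Int) : x ∈ pvDDist l ↔ x ∈ l := by
  induction l with
  | nil => simp [pvDDist]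
  | cons a t ih =>
    match t with
    | [] => simp [pvDDist]
    | b :: t' =>
      by_cases hab : a = b
      · subst hab; simp [pvDDist, ih]
      · simp only [pvDDist, if_neg hab, List.mem_cons]
        rw [ih]; simp

theorem pvDDist_cons_head (b : Int) (t : List Int) : ∃ r, pvDDist (b :: t) = b :: r := by
  induction t generalizing b with
  | nil => exact ⟨[], rfl⟩
  | cons c t' ih =>
    by_cases h : b = c
    · subst h; obtain ⟨r, hr⟩ := ih b; exact ⟨r, by simp [pvDDist, hr]⟩
    · exact ⟨pvDDist (c :: t'), by simp [pvDDist, h]⟩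

theorem pvDDist_pairwise (l : List Int) (h : l.Pairwise (· ≥ ·)) : (pvDDist l).Pairwise (· > ·) := by
  induction l with
  | nil => simp [pvDDist]
  | cons a t ih =>
    match t, h with
    | [], _ => simp [pvDDist]
    | b :: t', h =>
      have h2 : (b :: t').Pairwise (· ≥ ·) := h.sublist (List.sublist_cons_self _ _)
      by_cases hab : a = b
      · simpa [pvDDist, hab] using ih h2
      · simp only [pvDDist, if_neg hab]
        refine List.pairwise_cons.mpr ⟨?_, ih h2⟩
        intro x hx
        have hxm : x ∈ b :: t' := (mem_pvDDist _ _).mp hx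
        have hab' : a ≥ b := (List.pairwise_cons.mp h).1 b (by simp)
        have hxb : b ≥ x := by
          rcases List.mem_cons.mp hxm with heq | hxt
          · omega
          · exact (List.pairwise_cons.mp h2).1 x hxt
        omega


theorem head_gt_getElem {c : Int} {r : List Int} (h : (c :: r).Pairwise (· > ·)) (i : Nat)
    (h1 : 1 ≤ i) (h2 : i < (c :: r).length) : c > (c :: r)[i] := by
  match i, h1 with
  | Nat.succ j, _ =>
    rw [List.getElem_cons_succ]
    exact (List.pairwise_cons.mp h).1 _ (List.getElem_mem (by simpa using h2))

theorem pvALoop_filter (k : Nat) : ∀ (l : List Int), l.length ≤ k → l.Pairwise (· ≥ ·) →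
    ∀ n : Int, 0 < n → ∀ (hlen : n.toNat < (pvDDist l).length),
    pvALoop l n = l.filter (fun x => decide (x ≤ (pvDDist l)[n.toNat])) := by
  induction k with
  | zero =>
    intro l hl _ n _ hlen
    rw [List.length_eq_zero_iff.mp (Nat.le_zero.mp hl)] at hlen
    simp [pvDDist] at hlen
  | succ k ih =>
    intro l hl h n hn hlen
    match l, h with
    | [], _ => simp [pvDDist] at hlen
    | [a], _ => simp [pvDDist] at hlen; omega
    | a :: b :: t, h =>
      have h2 : (b :: t).Pairwise (· ≥ ·) := h.sublist (List.sublist_cons_self _ _)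
      have hab' : a ≥ b := (List.pairwise_cons.mp h).1 b (by simp)
      have hbt : ∀ x ∈ b :: t, x ≤ b := by
        intro x hx
        rcases List.mem_cons.mp hx with heq | hxt
        · omega
        · exact (List.pairwise_cons.mp h2).1 x hxt
      have hlt : (b :: t).length ≤ k := by simpa using hl
      obtain ⟨r, hr⟩ := pvDDist_cons_head b t
      by_cases hab : a = b
      · -- duplicate head: loop keeps n, pvDDist unchanged, a is above the threshold
        have hdd : pvDDist (a :: b :: t) = pvDDist (b :: t) := by simp [pvDDist, hab]
        have hlen' : n.toNat < (pvDDist (b :: t)).length := by rw [hdd] at hlen; exact hlen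
        have hpw : (b :: r).Pairwise (· > ·) := hr ▸ pvDDist_pairwise _ h2
        have hlr : n.toNat < (b :: r).length := by rw [← hr]; exact hlen'
        have hthr : (pvDDist (b :: t))[n.toNat] < b := by
          rw [List.getElem_of_eq hr]
          exact head_gt_getElem hpw n.toNat (by omega) hlr
        have hstep : pvALoop (a :: b :: t) n = pvALoop (b :: t) n := by
          rw [pvALoop]; simp [hn, hab]
        rw [hstep, ih _ hlt h2 n hn hlen']
        simp only [hdd]
        conv_rhs => rw [List.filter_cons]
        rw [if_neg (by simp only [decide_eq_true_eq]; omega)]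
      · -- new head value: loop decrements n, pvDDist gains a
        have hdd : pvDDist (a :: b :: t) = a :: pvDDist (b :: t) := by simp [pvDDist, hab]
        have hlen' : n.toNat - 1 < (pvDDist (b :: t)).length := by
          rw [hdd] at hlen; simp at hlen; omega
        have hidx : (pvDDist (a :: b :: t))[n.toNat] = (pvDDist (b :: t))[n.toNat - 1] := by
          have hn1 : n.toNat = (n.toNat - 1) + 1 := by omega
          simp only [hdd]
          rw [List.getElem_cons]
          rw [dif_neg (by omega)]
        have hthr_le : (pvDDist (b :: t))[n.toNat - 1] ≤ b := by
          have hm : (pvDDist (b :: t))[n.toNat - 1] ∈ pvDDist (b :: t) := List.getElem_mem hlen'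
          exact hbt _ ((mem_pvDDist _ _).mp hm)
        have hstep : pvALoop (a :: b :: t) n = pvALoop (b :: t) (n - 1) := by
          rw [pvALoop]; simp [hn, hab]
        rw [hstep, hidx]
        rw [List.filter_cons]
        simp only [decide_eq_true_eq]
        rw [if_neg (by omega)]
        by_cases hone : n = 1
        · subst hone
          have h0 : pvALoop (b :: t) (1 - 1) = b :: t := by
            rw [pvALoop.eq_def, if_neg (by omega)]
          rw [h0]
          have hthr0 : (pvDDist (b :: t))[(1 : Int).toNat - 1] = b := by
            simp only [hr]
            simp
          rw [hthr0]
          symm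
          exact List.filter_eq_self.mpr (fun x hx => by simpa using hbt x hx)
        · have hn1 : 0 < n - 1 := by omega
          have hlen'' : (n - 1).toNat < (pvDDist (b :: t)).length := by omega
          have heq : (n - 1).toNat = n.toNat - 1 := by omega
          have hres := ih _ hlt h2 (n - 1) hn1 hlen''
          simp only [heq] at hres
          exact hres

-- two strictly-decreasing integer lists with the same members are equal
theorem strictDesc_ext (l₁ : List Int) : ∀ (l₂ : List Int), l₁.Pairwise (· > ·) →
    l₂.Pairwise (· > ·) → (∀ x, x ∈ l₁ ↔ x ∈ l₂) → l₁ = l₂ := by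
  induction l₁ with
  | nil =>
    intro l₂ _ _ hm
    cases l₂ with
    | nil => rfl
    | cons c t₂ => exact absurd ((hm c).mpr (by simp)) (by simp)
  | cons a t₁ ih =>
    intro l₂ h₁ h₂ hm
    cases l₂ with
    | nil => exact absurd ((hm a).mp (by simp)) (by simp)
    | cons c t₂ =>
      have hac : a = c := by
        have h1 := (hm a).mp (by simp)
        have h2 := (hm c).mpr (by simp)
        rcases List.mem_cons.mp h1 with he | hm1
        · exact he
        · have := (List.pairwise_cons.mp h₂).1 a hm1
          rcases List.mem_cons.mp h2 with he | hm2
          · omega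
          · have := (List.pairwise_cons.mp h₁).1 c hm2
            omega
      subst hac
      have ht : t₁ = t₂ := by
        apply ih t₂ h₁.of_cons h₂.of_cons
        intro x
        constructor
        · intro hx
          have hlt := (List.pairwise_cons.mp h₁).1 x hx
          rcases List.mem_cons.mp ((hm x).mp (List.mem_cons_of_mem _ hx)) with he | h
          · omega
          · exact h
        · intro hx
          have hlt := (List.pairwise_cons.mp h₂).1 x hx
          rcases List.mem_cons.mp ((hm x).mpr (List.mem_cons_of_mem _ hx)) with he | h
          · omega
          · exact h
      rw [ht]

theorem pv_main (lista : List Int) (n : Int)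
    (hpre : n ≤ 0 ∨ n < ((PySem.List.dedup lista).length : Int)) :
    makniGetNajvece3 lista n = makniGetNajvece3_alt lista n := by
  by_cases hn : n ≤ 0
  · unfold makniGetNajvece3 makniGetNajvece3_alt
    rw [if_pos hn, pvALoop.eq_def, if_neg (by omega)]
  · have hn' : 0 < n := by omega
    set s := PySem.List.sorted lista (fun x => x) true with hs
    set distinct := PySem.List.sorted (PySem.Set.ofList lista) (fun x => x) false with hdst
    have hps : s.Pairwise (· ≥ ·) := PySem.List.sorted_pairwise_rev lista _ 
    have hlend : (PySem.List.dedup lista).length = distinct.length := by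
      rw [PySem.List.dedup_eq_ofList, hdst, PySem.List.length_sorted]
    have hd : n < (distinct.length : Int) := by
      rcases hpre with h | h
      · omega
      · rw [hlend] at h; exact h
    -- distinct.reverse = pvDDist s
    have hrev : distinct.reverse = pvDDist s := by
      apply strictDesc_ext
      · rw [List.pairwise_reverse]
        exact (PySem.List.sorted_ofList_pairwise_lt lista).imp (fun h => h)
      · exact pvDDist_pairwise s hps
      · intro x
        rw [List.mem_reverse, hdst, PySem.List.mem_sorted, PySem.Set.mem_ofList,
            mem_pvDDist, hs, PySem.List.mem_sorted]
    have hlen2 : distinct.length = (pvDDist s).length := by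
      rw [← hrev, List.length_reverse]
    have hlen3 : n.toNat < (pvDDist s).length := by omega
    -- the threshold B reads is the n-th largest distinct value
    have hget : PySem.List.pyGet? distinct (-n - 1) = some ((pvDDist s)[n.toNat]'hlen3) := by
      have hk : -n - 1 = -(((n.toNat + 1 : Nat) : Int)) := by omega
      rw [hk, PySem.List.pyGet?_neg_natCast _ _ (by omega) (by omega)]
      rw [List.getElem?_eq_getElem (by omega)]
      congr 1
      have : distinct[distinct.length - (n.toNat + 1)]'(by omega)
           = distinct.reverse[n.toNat]'(by rw [List.length_reverse]; omega) := by
        rw [List.getElem_reverse]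
        congr 1
        omega
      rw [this]
      exact List.getElem_of_eq hrev _
    -- assemble
    unfold makniGetNajvece3 makniGetNajvece3_alt
    rw [if_neg hn]
    simp only [← hdst, ← hs]
    rw [if_neg (by omega), hget]
    rw [pvALoop_filter s.length s (le_refl _) hps n hn' hlen3]
    -- sorting the filtered list = filtering the sorted list
    set p := fun x : Int => decide (x ≤ (pvDDist s)[n.toNat]'hlen3) with hp
    set Y := PySem.List.sorted (lista.filter p) (fun x => x) true with hY
    have hXp : (s.filter p).Pairwise (· ≥ ·) := hps.sublist List.filter_sublist
    have hYp : Y.Pairwise (· ≥ ·) := (PySem.List.sorted_pairwise_rev _ _).imp (fun h => h)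
    have hperm : (s.filter p).Perm Y := by
      refine (((PySem.List.sorted_perm lista (fun x => x) true).filter p).trans ?_)
      exact (PySem.List.sorted_perm (lista.filter p) (fun x => x) true).symm
    apply List.reverse_injective
    refine PySem.List.eq_of_perm_of_pairwise_le_of_injective (fun x : Int => x)
      (fun a b h => h) ?_ ?_ ?_
    · exact ((s.filter p).reverse_perm.trans hperm).trans Y.reverse_perm.symm
    · exact List.pairwise_reverse.mpr (hXp.imp (fun h => h))
    · exact List.pairwise_reverse.mpr (hYp.imp (fun h => h))

-- ===== VERDICT (by name: the statement is the Claim_ definition above) =====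
theorem makniGetNajvece3_spec : Claim_equal_makniGetNajvece3 := by
  intro lista n _ hpre
  unfold Pre_makniGetNajvece3 at hpre
  unfold Spec_makniGetNajvece3
  exact pv_main lista n hpre
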